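-- pv_equiv track=rewrite | github.com/takeyoshinitta/Levenshtein-distance-for-text | no_more_use/levenshtein_distance_count_error.py | error_counter
-- ===== SOURCE A (Python) =====
-- def error_counter(operations):
--     i = 0
--     d = 0
--     s = 0
--     for operation in operations:
--         i = i + 1 if operation[0] == 'I' else i
--         d = d + 1 if operation[0] == 'D' else d
--         s = s + 1 if operation[0] == 'S' else s
--     return i, d, s
-- ===== SOURCE B (Python) =====
-- def error_counter(operations):
--     # staged passes: extract first characters once, then count each tag separately
--     firsts = [op[0] for op in operations]
--     return firsts.count('I'), firsts.count('D'), firsts.count('S')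
-- ===== Notes on version B (the rewrite author's own statement) =====
-- stated objective: idiomatic
-- what changed: B replaces A's single loop with three conditional scalar accumulators by a staged decomposition: one comprehension extracting first characters, then three independent list.count passes.
import Mathlib
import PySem

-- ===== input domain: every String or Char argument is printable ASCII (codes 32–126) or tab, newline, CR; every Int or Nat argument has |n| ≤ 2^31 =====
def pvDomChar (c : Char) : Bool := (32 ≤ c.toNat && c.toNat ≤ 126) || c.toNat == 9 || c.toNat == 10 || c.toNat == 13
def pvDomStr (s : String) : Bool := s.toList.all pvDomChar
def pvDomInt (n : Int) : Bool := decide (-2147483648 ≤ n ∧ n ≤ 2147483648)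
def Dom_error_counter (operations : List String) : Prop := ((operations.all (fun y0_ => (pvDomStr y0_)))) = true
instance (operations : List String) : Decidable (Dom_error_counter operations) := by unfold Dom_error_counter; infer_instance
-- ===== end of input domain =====

-- B replaces A's one loop with three accumulators by staged passes: extract first characters, then three independent counts (same O(n) cost).

-- op[0]; exact on Pre_ (nonempty strings): PySem.Str.pyGet? returns none exactly where Python raises IndexError
def pvFst (op : String) : Char := (PySem.Str.pyGet? op 0).getD ' '

-- ===== PORT A =====
def error_counter (operations : List String) : Int × Int × Int :=
  operations.foldl
    (fun (acc : Int × Int × Int) operation =>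
      let i := if pvFst operation == 'I' then acc.1 + 1 else acc.1
      let d := if pvFst operation == 'D' then acc.2.1 + 1 else acc.2.1
      let s := if pvFst operation == 'S' then acc.2.2 + 1 else acc.2.2
      (i, d, s))
    (0, 0, 0)

-- ===== PORT B =====
def error_counter_alt (operations : List String) : Int × Int × Int :=
  let firsts := operations.map pvFst
  ((PySem.List.count firsts 'I' : Int), (PySem.List.count firsts 'D' : Int),
   (PySem.List.count firsts 'S' : Int))

-- ===== PRECONDITION & SPEC =====
-- Pre_ excludes lists containing an empty string, on which the Python A (operation[0]) raises IndexError.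
def Pre_error_counter (operations : List String) : Prop := ∀ op ∈ operations, op ≠ ""
instance (operations : List String) : Decidable (Pre_error_counter operations) := by unfold Pre_error_counter; infer_instance
def pvWitness_error_counter : List String := ["I2", "D1", "Sx", "Q"]
def Spec_error_counter (operations : List String) (out : Int × Int × Int) : Prop := out = error_counter_alt operations
instance (operations : List String) (out : Int × Int × Int) : Decidable (Spec_error_counter operations out) := by unfold Spec_error_counter; infer_instance

-- ===== CLAIM (what is proved, stated in full; the proofs are below) =====
def Claim_equal_error_counter : Prop := ∀ (operations : List String), Dom_error_counter operations → Pre_error_counter operations → Spec_error_counter operations (error_counter operations)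

-- ===== LEMMAS AND PROOFS =====

-- A's triple-accumulator loop computes the three first-character counts
theorem tripleFoldA (ops : List String) (i d s : Int) :
    ops.foldl
      (fun (acc : Int × Int × Int) operation =>
        let i := if pvFst operation == 'I' then acc.1 + 1 else acc.1
        let d := if pvFst operation == 'D' then acc.2.1 + 1 else acc.2.1
        let s := if pvFst operation == 'S' then acc.2.2 + 1 else acc.2.2
        (i, d, s))
      (i, d, s)
    = (i + (ops.map pvFst).count 'I', d + (ops.map pvFst).count 'D',
       s + (ops.map pvFst).count 'S') := by
  induction ops generalizing i d s with
  | nil => simp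
  | cons op ops ih =>
    simp only [List.foldl_cons, ih, List.map_cons, List.count_cons, Prod.mk.injEq]
    refine ⟨?_, ?_, ?_⟩
    · by_cases h : pvFst op == 'I' <;> simp [h] <;> ring
    · by_cases h : pvFst op == 'D' <;> simp [h] <;> ring
    · by_cases h : pvFst op == 'S' <;> simp [h] <;> ring

-- ===== VERDICT (by name: the statement is the Claim_ definition above) =====
theorem error_counter_spec : Claim_equal_error_counter := by
  intro operations _ _
  show error_counter operations = error_counter_alt operations
  unfold error_counter error_counter_alt
  rw [tripleFoldA]
  simp [PySem.List.count]
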